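-- pv_equiv track=rewrite | github.com/ckoons/BubbleSpacetimeTheory | play/toy_1384_biquadratic_field_id.py | factor_small
-- ===== SOURCE A (Python) =====
-- import math
--
-- def factor_small(n):
--     """Factor n into prime powers (for display)."""
--     if n <= 1:
--         return str(n)
--     factors = []
--     temp = abs(n)
--     for p in range(2, min(1000, int(math.sqrt(temp)) + 2)):
--         e = 0
--         while temp % p == 0:
--             temp //= p
--             e += 1
--         if e > 0:
--             factors.append(f"{p}^{e}" if e > 1 else str(p))
--     if temp > 1:
--         factors.append(str(temp))
--     return " * ".join(factors) if factors else str(n)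
-- ===== SOURCE B (Python) =====
-- import math
--
-- def _is_prime(d):
--     return d >= 2 and all(d % m for m in range(2, math.isqrt(d) + 1))
--
-- def factor_small(n):
--     """Factor n into prime powers (for display)."""
--     if n <= 1:
--         return str(n)
--     temp = abs(n)
--     bound = min(1000, math.isqrt(temp) + 2)
--     primes = [p for p in range(2, bound) if _is_prime(p)]
--     pairs = []
--     for p in primes:
--         e = 0
--         while temp % p == 0:
--             temp //= p
--             e += 1
--         if e:
--             pairs.append((p, e))
--     parts = [f"{p}^{e}" if e > 1 else str(p) for (p, e) in pairs]
--     if temp > 1: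
--         parts.append(str(temp))
--     return " * ".join(parts) if parts else str(n)
-- ===== Notes on version B (the rewrite author's own statement) =====
-- stated objective: alternative
-- what changed: B precomputes the list of primes below A's bound with a trial-division primality test and peels exponents only for those primes, collecting (p,e) pairs formatted in a separate pass, instead of A's single inline pass that trial-divides by every integer candidate in the range.
import Mathlib
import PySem

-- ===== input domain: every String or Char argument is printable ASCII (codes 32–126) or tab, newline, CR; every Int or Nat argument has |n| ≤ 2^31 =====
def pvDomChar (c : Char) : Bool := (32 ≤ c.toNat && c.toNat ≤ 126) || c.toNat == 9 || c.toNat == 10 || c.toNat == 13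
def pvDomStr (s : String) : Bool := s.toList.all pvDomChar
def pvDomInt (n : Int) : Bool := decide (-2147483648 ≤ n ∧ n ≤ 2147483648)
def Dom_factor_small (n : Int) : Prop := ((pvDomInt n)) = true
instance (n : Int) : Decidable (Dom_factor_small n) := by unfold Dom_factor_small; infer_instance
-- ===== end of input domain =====

-- B replaces A's trial division by every integer candidate with a pass over a precomputed
-- prime list, collecting (p,e) pairs formatted separately (objective: alternative algorithm).

-- ===== PORT A =====
-- inner 'while temp % p == 0: temp //= p; e += 1' of A; the 2 ≤ p / 0 < temp conjuncts are
-- totality guards only — they hold at every call site, so the guard is Python's loop test.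
-- temp stays nonnegative throughout, so Nat % and / are Python's % and //.
def pvPeelA (p temp : Nat) : Nat × Nat :=
  if h : 2 ≤ p ∧ 0 < temp ∧ temp % p = 0 then
    let r := pvPeelA p (temp / p)
    (r.1 + 1, r.2)
  else (0, temp)
termination_by temp
decreasing_by exact Nat.div_lt_self h.2.1 h.1

-- f"{p}^{e}" if e > 1 else str(p)
def pvFmtA (p e : Nat) : String :=
  if e > 1 then PySem.Int.toStr (p : Int) ++ "^" ++ PySem.Int.toStr (e : Int)
  else PySem.Int.toStr (p : Int)

-- one iteration of A's for-loop body over state (temp, factors)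
def pvStepA (acc : Nat × List String) (p : Nat) : Nat × List String :=
  let r := pvPeelA p acc.1
  (r.2, if r.1 > 0 then acc.2 ++ [pvFmtA p r.1] else acc.2)

def factor_small (n : Int) : String :=
  if n ≤ 1 then PySem.Int.toStr n
  else
    -- abs(n) = n here (2 ≤ n); int(math.sqrt(temp)) = Nat.sqrt temp exactly for |n| ≤ 2^31
    let temp := n.toNat
    let bound := min 1000 (Nat.sqrt temp + 2)
    -- range(2, bound)
    let r := (List.range' 2 (bound - 2)).foldl pvStepA (temp, [])
    let factors := if r.1 > 1 then r.2 ++ [PySem.Int.toStr (r.1 : Int)] else r.2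
    if factors = [] then PySem.Int.toStr n else PySem.Str.join " * " factors

-- ===== PORT B =====
-- _is_prime: d >= 2 and all(d % m for m in range(2, isqrt(d) + 1))
def pvIsPrimeB (d : Nat) : Bool :=
  decide (2 ≤ d) && (List.range' 2 (Nat.sqrt d + 1 - 2)).all (fun m => d % m != 0)

-- inner while loop of B (same totality guard remark as pvPeelA)
def pvPeelB (p temp : Nat) : Nat × Nat :=
  if h : 2 ≤ p ∧ 0 < temp ∧ temp % p = 0 then
    let r := pvPeelB p (temp / p)
    (r.1 + 1, r.2)
  else (0, temp)
termination_by temp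
decreasing_by exact Nat.div_lt_self h.2.1 h.1

-- one iteration of B's for-loop over (temp, pairs)
def pvStepB (acc : Nat × List (Nat × Nat)) (p : Nat) : Nat × List (Nat × Nat) :=
  let r := pvPeelB p acc.1
  (r.2, if r.1 > 0 then acc.2 ++ [(p, r.1)] else acc.2)

def pvFmtB (p e : Nat) : String :=
  if e > 1 then PySem.Int.toStr (p : Int) ++ "^" ++ PySem.Int.toStr (e : Int)
  else PySem.Int.toStr (p : Int)

def factor_small_alt (n : Int) : String :=
  if n ≤ 1 then PySem.Int.toStr n
  else
    let temp := n.toNat     -- abs(n) = n here; math.isqrt = Nat.sqrt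
    let bound := min 1000 (Nat.sqrt temp + 2)
    let primes := (List.range' 2 (bound - 2)).filter pvIsPrimeB
    let r := primes.foldl pvStepB (temp, [])
    let parts := r.2.map (fun pe => pvFmtB pe.1 pe.2)
    let parts := if r.1 > 1 then parts ++ [PySem.Int.toStr (r.1 : Int)] else parts
    if parts = [] then PySem.Int.toStr n else PySem.Str.join " * " parts

-- ===== PRECONDITION & SPEC =====
def Spec_factor_small (n : Int) (out : String) : Prop := out = factor_small_alt n
instance (n : Int) (out : String) : Decidable (Spec_factor_small n out) := by unfold Spec_factor_small; infer_instance

-- ===== CLAIM (what is proved, stated in full; the proofs are below) =====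
def Claim_equal_factor_small : Prop := ∀ (n : Int), Dom_factor_small n → Spec_factor_small n (factor_small n)

-- ===== LEMMAS AND PROOFS =====

lemma pvPeelB_eq_pvPeelA (p temp : Nat) : pvPeelB p temp = pvPeelA p temp := by
  fun_induction pvPeelB p temp with
  | case1 t h r ih => rw [pvPeelA.eq_def, dif_pos h]; simp only [r, ih]
  | case2 t h => rw [pvPeelA.eq_def, dif_neg h]

lemma pvPeelA_of_not_dvd {p temp : Nat} (h : ¬ p ∣ temp) : pvPeelA p temp = (0, temp) := by
  rw [pvPeelA.eq_def, dif_neg]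
  intro ⟨_, _, hm⟩
  exact h ((Nat.dvd_iff_mod_eq_zero).mpr hm)

lemma pvPeelA_snd_dvd (p temp : Nat) : (pvPeelA p temp).2 ∣ temp := by
  fun_induction pvPeelA p temp with
  | case1 t h r ih =>
      exact dvd_trans ih (Nat.div_dvd_of_dvd ((Nat.dvd_iff_mod_eq_zero).mpr h.2.2))
  | case2 t h => exact dvd_refl t

lemma pvPeelA_snd_pos (p temp : Nat) (ht : 0 < temp) : 0 < (pvPeelA p temp).2 := by
  fun_induction pvPeelA p temp with
  | case1 t h r ih =>
      exact ih (Nat.div_pos (Nat.le_of_dvd h.2.1 ((Nat.dvd_iff_mod_eq_zero).mpr h.2.2)) (by omega))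
  | case2 t h => exact ht

lemma pvPeelA_not_dvd_snd (p temp : Nat) (hp : 2 ≤ p) (ht : 0 < temp) :
    ¬ p ∣ (pvPeelA p temp).2 := by
  fun_induction pvPeelA p temp with
  | case1 t h r ih =>
      exact ih (Nat.div_pos (Nat.le_of_dvd h.2.1 ((Nat.dvd_iff_mod_eq_zero).mpr h.2.2)) (by omega))
  | case2 t h =>
      intro hd
      exact h ⟨hp, ht, (Nat.dvd_iff_mod_eq_zero).mp hd⟩

-- accumulator extraction for the two folds
lemma foldA_acc (L : List Nat) : ∀ (temp : Nat) (fs : List String),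
    L.foldl pvStepA (temp, fs) =
      ((L.foldl pvStepA (temp, [])).1, fs ++ (L.foldl pvStepA (temp, [])).2) := by
  induction L with
  | nil => simp
  | cons p L ih =>
      intro temp fs
      simp only [List.foldl_cons]
      rw [ih ((pvStepA (temp, fs) p).1) ((pvStepA (temp, fs) p).2),
          ih ((pvStepA (temp, ([] : List String)) p).1) ((pvStepA (temp, []) p).2)]
      simp only [pvStepA]
      split <;> simp

lemma foldB_acc (L : List Nat) : ∀ (temp : Nat) (ps : List (Nat × Nat)),
    L.foldl pvStepB (temp, ps) =
      ((L.foldl pvStepB (temp, [])).1, ps ++ (L.foldl pvStepB (temp, [])).2) := by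
  induction L with
  | nil => simp
  | cons p L ih =>
      intro temp ps
      simp only [List.foldl_cons]
      rw [ih ((pvStepB (temp, ps) p).1) ((pvStepB (temp, ps) p).2),
          ih ((pvStepB (temp, ([] : List (Nat × Nat))) p).1) ((pvStepB (temp, []) p).2)]
      simp only [pvStepB]
      split <;> simp

-- a composite candidate never divides a temp stripped of all smaller factors
lemma composite_not_dvd {d temp : Nat} (hd : 2 ≤ d) (hP : pvIsPrimeB d = false)
    (hinv : ∀ m, 2 ≤ m → m < d → ¬ m ∣ temp) : ¬ d ∣ temp := by
  unfold pvIsPrimeB at hP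
  rw [Bool.and_eq_false_iff] at hP
  rcases hP with hP | hP
  · simp at hP; omega
  · rw [List.all_eq_false] at hP
    obtain ⟨m, hm, hmod⟩ := hP
    rw [List.mem_range'] at hm
    obtain ⟨i, hi, rfl⟩ := hm
    simp only [bne] at hmod
    have hmd : (2 + i) ∣ d := (Nat.dvd_iff_mod_eq_zero).mpr (by simpa using hmod)
    have hsq : (2 + i) ≤ Nat.sqrt d := by omega
    have hmm : (2 + i) ^ 2 ≤ d := Nat.le_sqrt'.mp hsq
    have hlt : (2 + i) < d := by nlinarith
    intro hdt
    exact hinv (2 + i) (by omega) hlt (dvd_trans hmd hdt)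

-- main correspondence: A's fold over all candidates = B's fold over the prime candidates
lemma main_fold : ∀ (k d temp : Nat), 2 ≤ d → 0 < temp →
    (∀ m, 2 ≤ m → m < d → ¬ m ∣ temp) →
    (List.range' d k).foldl pvStepA (temp, []) =
      ((((List.range' d k).filter pvIsPrimeB).foldl pvStepB (temp, [])).1,
       (((List.range' d k).filter pvIsPrimeB).foldl pvStepB (temp, [])).2.map
         (fun pe => pvFmtA pe.1 pe.2)) := by
  intro k
  induction k with
  | zero => intro d temp _ _ _; simp
  | succ k ih =>
      intro d temp hd ht hinv
      rw [List.range'_succ]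
      by_cases hP : pvIsPrimeB d = true
      · -- d kept on both sides; both run the peel step
        rw [List.filter_cons_of_pos hP]
        simp only [List.foldl_cons]
        have hstep : pvStepA (temp, []) d =
            ((pvPeelA d temp).2,
             if (pvPeelA d temp).1 > 0 then [pvFmtA d (pvPeelA d temp).1] else []) := by
          simp [pvStepA]
        have hstepB : pvStepB (temp, ([] : List (Nat × Nat))) d =
            ((pvPeelA d temp).2,
             if (pvPeelA d temp).1 > 0 then [(d, (pvPeelA d temp).1)] else []) := by
          simp [pvStepB, pvPeelB_eq_pvPeelA]
        rw [hstep, hstepB]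
        have ht'pos : 0 < (pvPeelA d temp).2 := pvPeelA_snd_pos d temp ht
        have hinv' : ∀ m, 2 ≤ m → m < d + 1 → ¬ m ∣ (pvPeelA d temp).2 := by
          intro m h2 hlt hmd
          rcases Nat.lt_succ_iff_lt_or_eq.mp hlt with hlt | rfl
          · exact hinv m h2 hlt (dvd_trans hmd (pvPeelA_snd_dvd d temp))
          · exact pvPeelA_not_dvd_snd m temp hd ht hmd
        rw [foldA_acc, foldB_acc, ih (d + 1) (pvPeelA d temp).2 (by omega) ht'pos hinv']
        split <;> simp
      · -- d composite: A's step is the identity, B drops d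
        rw [Bool.not_eq_true] at hP
        have hnd : ¬ d ∣ temp := composite_not_dvd hd hP hinv
        have hstep : pvStepA (temp, ([] : List String)) d = (temp, []) := by
          simp [pvStepA, pvPeelA_of_not_dvd hnd]
        rw [List.filter_cons_of_neg (by simp [hP])]
        simp only [List.foldl_cons]
        rw [hstep]
        exact ih (d + 1) temp (by omega) ht (by
          intro m h2 hlt hmd
          rcases Nat.lt_succ_iff_lt_or_eq.mp hlt with hlt | rfl
          · exact hinv m h2 hlt hmd
          · exact hnd hmd)

-- ===== VERDICT (by name: the statement is the Claim_ definition above) =====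
theorem factor_small_spec : Claim_equal_factor_small := by
  intro n _
  unfold Spec_factor_small factor_small factor_small_alt
  by_cases h1 : n ≤ 1
  · simp [h1]
  · rw [if_neg h1, if_neg h1]
    have hpos : 0 < n.toNat := by omega
    have := main_fold (min 1000 (Nat.sqrt n.toNat + 2) - 2) 2 n.toNat (le_refl 2) hpos
      (by intro m h2 hlt; omega)
    simp only [pvFmtB]
    rw [this]
    split <;> simp [pvFmtA]
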